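-- pv_equiv track=rewrite | github.com/louismaillet/BUT1 | semestre1/test/init_system_2/TP_10 Représentation de la mémoire, dictionnaires, matrices-20241127/ecosysteme/ecosysteme.py | en_voie_disparition
-- ===== SOURCE A (Python) =====
-- def extinction_immediate(ecosysteme, animal):
--     """
--     renvoie True si animal s'éteint immédiatement dans l'écosystème faute
--     de nourriture
--     """
--     if ecosysteme[animal] in ecosysteme.keys() or ecosysteme[animal]==None :return False
--     else : return True
--
-- def en_voie_disparition(ecosysteme, animal):
--     """
--     renvoie True si animal s'éteint est voué à disparaitre à long terme
--     """
--     extinction = False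
--     cpt = 0
--     while(extinction == False and animal != None and cpt < len(ecosysteme)):
--         extinction = extinction_immediate(ecosysteme, animal)
--         cpt += 1
--         if (not extinction):
--             animal = ecosysteme[animal]
--     return extinction
-- ===== SOURCE B (Python) =====
-- def en_voie_disparition(ecosysteme, animal):
--     """
--     True iff animal's food chain eventually reaches a food item absent from
--     the ecosystem.  Instead of walking the chain step by step, compute the set
--     of ALL doomed species at once by a fixpoint relaxation, then answer the
--     query by one lookup plus a membership test.
--     """
--     if not ecosysteme:
--         return False
--     food = ecosysteme[animal]  # KeyError for an unknown animal, as in the chain walk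
--     if food is None:
--         return False
--     if food not in ecosysteme:
--         return True
--     # doomed = species whose own chain reaches a missing food item
--     doomed = {a for a, f in ecosysteme.items() if f is not None and f not in ecosysteme}
--     changed = True
--     while changed:
--         changed = False
--         for a, f in ecosysteme.items():
--             if a not in doomed and f in doomed:
--                 doomed.add(a)
--                 changed = True
--     return food in doomed
-- ===== Notes on version B (the rewrite author's own statement) =====
-- stated objective: alternative
-- what changed: Replaced the per-query chain walk (bounded-counter while loop stepping animal = ecosysteme[animal] with the extinction_immediate helper) by a global dataflow fixpoint: compute once the set of all doomed species (seeded with species whose food is missing, relaxed until no change), then answer the query by a single lookup plus a membership test.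
import Mathlib
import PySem

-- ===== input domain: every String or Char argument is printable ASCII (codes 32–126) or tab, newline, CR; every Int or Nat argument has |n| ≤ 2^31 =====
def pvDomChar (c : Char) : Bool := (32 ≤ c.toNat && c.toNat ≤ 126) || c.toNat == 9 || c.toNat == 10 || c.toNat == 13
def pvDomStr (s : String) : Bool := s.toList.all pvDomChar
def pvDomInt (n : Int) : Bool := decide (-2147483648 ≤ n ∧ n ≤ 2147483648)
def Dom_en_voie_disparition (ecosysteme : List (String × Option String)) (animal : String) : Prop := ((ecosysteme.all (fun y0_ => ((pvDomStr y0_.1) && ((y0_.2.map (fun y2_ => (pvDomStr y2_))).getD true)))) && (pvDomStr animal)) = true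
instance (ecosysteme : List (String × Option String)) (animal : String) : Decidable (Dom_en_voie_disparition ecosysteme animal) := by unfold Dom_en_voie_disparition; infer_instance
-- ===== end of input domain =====

-- B replaces A's per-query chain walk (bounded counter + extinction_immediate helper)
-- by a global fixpoint: compute the set of ALL doomed species once, answer by membership.

-- ===== PORT A =====
-- extinction_immediate: True iff the animal's food is neither None nor a key.
-- A's 'ecosysteme[animal]' raises KeyError for a non-key animal; Pre_ excludes that,
-- the port reads the lookup with default none there.
def pvExtImm (d : PySem.Dict String (Option String)) (animal : String) : Bool :=
  let food := d.getD animal none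
  if (match food with | none => true | some f => d.contains f) then false else true

-- the while loop of A; fuel = len(ecosysteme) - cpt
def pvALoop (d : PySem.Dict String (Option String)) : Option String → Nat → Bool
  | _, 0 => false
  | none, _ + 1 => false
  | some a, n + 1 =>
    if pvExtImm d a then true
    else pvALoop d (d.getD a none) n

def en_voie_disparition (ecosysteme : List (String × Option String)) (animal : String) : Bool :=
  let d := PySem.Dict.ofList ecosysteme
  pvALoop d (some animal) d.size

-- ===== PORT B =====
-- the set comprehension seeding doomed: {a for a, f in items if f is not None and f not in ecosysteme}
def pvInitStep (d : PySem.Dict String (Option String)) (s : PySem.Set String) (p : String × Option String) : PySem.Set String :=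
  match p.2 with
  | none => s
  | some f => if !d.contains f then PySem.Set.add s p.1 else s

def pvInit (d : PySem.Dict String (Option String)) : PySem.Set String :=
  d.items.foldl (pvInitStep d) PySem.Set.empty

-- the body of 'for a, f in ecosysteme.items()': state (doomed, changed)
def pvPassStep (st : PySem.Set String × Bool) (p : String × Option String) : PySem.Set String × Bool :=
  if !(PySem.Set.contains st.1 p.1) && (match p.2 with | none => false | some f => PySem.Set.contains st.1 f)
  then (PySem.Set.add st.1 p.1, true) else st

-- the 'while changed' relaxation; fuel d.size + 1 is a totality bound only: every
-- pass that reports a change added at least one key, and at most d.size fit.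
def pvFixLoop (d : PySem.Dict String (Option String)) : PySem.Set String → Nat → PySem.Set String
  | s, 0 => s
  | s, n + 1 =>
    let st := d.items.foldl pvPassStep (s, false)
    if st.2 then pvFixLoop d st.1 n else st.1

def pvDoomed (d : PySem.Dict String (Option String)) : PySem.Set String :=
  pvFixLoop d (pvInit d) (d.size + 1)

def en_voie_disparition_alt (ecosysteme : List (String × Option String)) (animal : String) : Bool :=
  let d := PySem.Dict.ofList ecosysteme
  if d.size = 0 then false
  else
    -- B's 'food = ecosysteme[animal]' raises KeyError for a non-key animal (outside Pre_)
    match d.getD animal none with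
    | none => false
    | some f =>
      if !d.contains f then true
      else PySem.Set.contains (pvDoomed d) f

-- ===== PRECONDITION & SPEC =====
-- Pre_ excludes exactly the inputs where both Pythons raise KeyError: an initial
-- animal that is not a key of a non-empty ecosysteme.
def Pre_en_voie_disparition (ecosysteme : List (String × Option String)) (animal : String) : Prop :=
  ecosysteme = [] ∨ animal ∈ ecosysteme.map Prod.fst
instance (ecosysteme : List (String × Option String)) (animal : String) : Decidable (Pre_en_voie_disparition ecosysteme animal) := by unfold Pre_en_voie_disparition; infer_instance

def pvWitness_en_voie_disparition : (List (String × Option String)) × String := ([("lion", some "gazelle")], "lion")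

def Spec_en_voie_disparition (ecosysteme : List (String × Option String)) (animal : String) (out : Bool) : Prop := out = en_voie_disparition_alt ecosysteme animal
instance (ecosysteme : List (String × Option String)) (animal : String) (out : Bool) : Decidable (Spec_en_voie_disparition ecosysteme animal out) := by unfold Spec_en_voie_disparition; infer_instance

-- ===== CLAIM (what is proved, stated in full; the proofs are below) =====
def Claim_equal_en_voie_disparition : Prop := ∀ (ecosysteme : List (String × Option String)) (animal : String), Dom_en_voie_disparition ecosysteme animal → Pre_en_voie_disparition ecosysteme animal → Spec_en_voie_disparition ecosysteme animal (en_voie_disparition ecosysteme animal)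

-- ===== LEMMAS AND PROOFS =====

-- A's loop on None food returns False at any fuel.
lemma pvALoop_none (d : PySem.Dict String (Option String)) (n : Nat) :
    pvALoop d none n = false := by cases n <;> rfl

-- A's loop is monotone in its fuel.
lemma pvALoop_mono (d : PySem.Dict String (Option String)) :
    ∀ (n m : Nat) (o : Option String), n ≤ m → pvALoop d o n = true → pvALoop d o m = true := by
  intro n
  induction n with
  | zero =>
    intro m o _ h
    cases o <;> simp [pvALoop] at h
  | succ k ih =>
    intro m o hle h
    cases o with
    | none => rw [pvALoop_none] at h; exact absurd h (by simp)
    | some a =>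
      obtain ⟨m', rfl⟩ : ∃ m', m = m' + 1 := ⟨m - 1, by omega⟩
      simp only [pvALoop] at h ⊢
      split_ifs at h ⊢ with he
      · rfl
      · exact ih m' _ (by omega) h

lemma contains_of_getD_some (d : PySem.Dict String (Option String)) (a f : String)
    (h : d.getD a none = some f) : d.contains a = true := by
  cases hc : d.contains a with
  | true => rfl
  | false => rw [PySem.Dict.getD_of_not_contains d none hc] at h; exact absurd h (by simp)

lemma mem_items_getD (d : PySem.Dict String (Option String)) (a : String)
    (hc : d.contains a = true) : (a, d.getD a none) ∈ d.items := by
  rw [PySem.Dict.contains_eq_isSome_get?] at hc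
  obtain ⟨v, hv⟩ := Option.isSome_iff_exists.mp hc
  rw [PySem.Dict.getD_of_get?_eq_some d none hv]
  exact PySem.Dict.mem_items_of_get?_eq_some d hv

lemma length_le_size (d : PySem.Dict String (Option String))
    (S : List String) (hsub : S ⊆ d.keys) (hnod : S.Nodup) : S.length ≤ d.size := by
  have h := List.Subperm.length_le (List.Nodup.subperm hnod hsub)
  have : d.keys.length = d.size := by simp [PySem.Dict.keys, PySem.Dict.size]
  omega

-- pvExtImm computations
lemma pvExtImm_none (d : PySem.Dict String (Option String)) (a : String)
    (h : d.getD a none = none) : pvExtImm d a = false := by simp [pvExtImm, h]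

lemma pvExtImm_key (d : PySem.Dict String (Option String)) (a f : String)
    (h : d.getD a none = some f) (hf : d.contains f = true) : pvExtImm d a = false := by
  simp [pvExtImm, h, hf]

lemma pvExtImm_missing (d : PySem.Dict String (Option String)) (a f : String)
    (h : d.getD a none = some f) (hf : d.contains f = false) : pvExtImm d a = true := by
  simp [pvExtImm, h, hf]

lemma pvExtImm_true_elim (d : PySem.Dict String (Option String)) (a : String)
    (h : pvExtImm d a = true) : ∃ f, d.getD a none = some f ∧ d.contains f = false := by
  cases hg : d.getD a none with
  | none => rw [pvExtImm_none d a hg] at h; exact absurd h (by simp)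
  | some f =>
    cases hf : d.contains f with
    | true => rw [pvExtImm_key d a f hg hf] at h; exact absurd h (by simp)
    | false => exact ⟨f, rfl, hf⟩

-- the seeding fold only grows the set
lemma pvInit_fold_subset (d : PySem.Dict String (Option String)) :
    ∀ (l : List (String × Option String)) (S : PySem.Set String),
      S ⊆ l.foldl (pvInitStep d) S := by
  intro l
  induction l with
  | nil => intro S; exact fun _ h => h
  | cons p l ih =>
    intro S
    refine fun x hx => ih (pvInitStep d S p) ?_
    cases hp2 : p.2 with
    | none => simpa [pvInitStep, hp2] using hx
    | some f =>
      simp only [pvInitStep, hp2]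
      split_ifs with hf
      · exact (PySem.Set.mem_add _ _ _).mpr (Or.inl hx)
      · exact hx

-- every item with a missing food ends up in the seed set
lemma pvInit_fold_mem (d : PySem.Dict String (Option String)) :
    ∀ (l : List (String × Option String)) (S : PySem.Set String) (a f : String),
      (a, some f) ∈ l → d.contains f = false → a ∈ l.foldl (pvInitStep d) S := by
  intro l
  induction l with
  | nil => intro S a f h _; exact absurd h (by simp)
  | cons p l ih =>
    intro S a f hmem hf
    rcases List.mem_cons.mp hmem with rfl | h
    · apply pvInit_fold_subset d l
      simp only [pvInitStep, hf, Bool.not_false, if_true]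
      exact (PySem.Set.mem_add _ _ _).mpr (Or.inr rfl)
    · exact ih _ a f h hf

-- invariant of the seeding fold: members are keys, distinct, and detected by A
lemma pvInit_fold_inv (d : PySem.Dict String (Option String)) :
    ∀ (l : List (String × Option String)) (S : PySem.Set String),
      (∀ p ∈ l, d.getD p.1 none = p.2) →
      (∀ a ∈ S, pvALoop d (some a) S.length = true) → S ⊆ d.keys → S.Nodup →
      (∀ a ∈ l.foldl (pvInitStep d) S, pvALoop d (some a) (l.foldl (pvInitStep d) S).length = true) ∧
      (l.foldl (pvInitStep d) S) ⊆ d.keys ∧ (l.foldl (pvInitStep d) S).Nodup := by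
  intro l
  induction l with
  | nil => intro S _ h1 h2 h3; exact ⟨h1, h2, h3⟩
  | cons p l ih =>
    intro S hitems hgood hsub hnod
    have hp := hitems p (by simp)
    have htail : ∀ q ∈ l, d.getD q.1 none = q.2 := fun q hq => hitems q (by simp [hq])
    simp only [List.foldl_cons]
    have hstep : pvInitStep d S p = S ∨
        (pvInitStep d S p = S ++ [p.1] ∧ p.1 ∉ S ∧ pvExtImm d p.1 = true) := by
      cases hp2 : p.2 with
      | none => left; simp [pvInitStep, hp2]
      | some f =>
        cases hf : d.contains f with
        | true => left; simp [pvInitStep, hp2, hf]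
        | false =>
          by_cases hm : p.1 ∈ S
          · left; simp [pvInitStep, hp2, hf, PySem.Set.add_of_mem hm]
          · right
            refine ⟨?_, hm, pvExtImm_missing d p.1 f (by rw [hp, hp2]) hf⟩
            simp [pvInitStep, hp2, hf, PySem.Set.add_of_not_mem hm]
    rcases hstep with heq | ⟨heq, hnm, hext⟩
    · rw [heq]; exact ih S htail hgood hsub hnod
    · rw [heq]
      apply ih
      · exact htail
      · intro a ha
        rcases List.mem_append.mp ha with h | h
        · exact pvALoop_mono d S.length _ _ (by simp) (hgood a h)
        · rw [List.mem_singleton] at h; subst h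
          have hlen : (S ++ [p.1]).length = S.length + 1 := by simp
          rw [hlen]
          simp [pvALoop, hext]
      · intro a ha
        rcases List.mem_append.mp ha with h | h
        · exact hsub h
        · rw [List.mem_singleton] at h; subst h
          obtain ⟨f, hg, _⟩ := pvExtImm_true_elim d p.1 hext
          exact (PySem.Dict.contains_iff_mem_keys _ _).mp (contains_of_getD_some d p.1 f hg)
      · exact List.Nodup.append hnod (List.nodup_singleton p.1)
          (by simp [List.disjoint_singleton, hnm])

-- invariant of one relaxation pass
lemma pvPass_fold_inv (d : PySem.Dict String (Option String)) :
    ∀ (l : List (String × Option String)) (S : PySem.Set String) (c : Bool),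
      (∀ p ∈ l, d.getD p.1 none = p.2) →
      (∀ a ∈ S, pvALoop d (some a) S.length = true) → S ⊆ d.keys → S.Nodup →
      (∀ a ∈ (l.foldl pvPassStep (S, c)).1, pvALoop d (some a) (l.foldl pvPassStep (S, c)).1.length = true) ∧
      S ⊆ (l.foldl pvPassStep (S, c)).1 ∧ (l.foldl pvPassStep (S, c)).1 ⊆ d.keys ∧
      (l.foldl pvPassStep (S, c)).1.Nodup ∧
      (c = true → (l.foldl pvPassStep (S, c)).2 = true) ∧
      ((l.foldl pvPassStep (S, c)).2 = false →
        (l.foldl pvPassStep (S, c)).1 = S ∧ ∀ p ∈ l, ∀ f, p.2 = some f → f ∈ S → p.1 ∈ S) ∧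
      (c = false → (l.foldl pvPassStep (S, c)).2 = true → S.length < (l.foldl pvPassStep (S, c)).1.length) := by
  intro l
  induction l with
  | nil =>
    intro S c _ h1 h2 h3
    refine ⟨h1, fun _ h => h, h2, h3, fun h => h, fun _ => ⟨rfl, by simp⟩, fun hc h => ?_⟩
    rw [hc] at h; exact absurd h (by simp)
  | cons p l ih =>
    intro S c hitems hgood hsub hnod
    have hp := hitems p (by simp)
    have htail : ∀ q ∈ l, d.getD q.1 none = q.2 := fun q hq => hitems q (by simp [hq])
    simp only [List.foldl_cons]
    by_cases hcond : (!(PySem.Set.contains S p.1) &&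
        (match p.2 with | none => false | some f => PySem.Set.contains S f)) = true
    · -- p.1 is added, flag set
      obtain ⟨hnm, f, hp2, hfS⟩ : p.1 ∉ S ∧ ∃ f, p.2 = some f ∧ f ∈ S := by
        rw [Bool.and_eq_true] at hcond
        obtain ⟨h1, h2⟩ := hcond
        refine ⟨by simpa using h1, ?_⟩
        cases hp2 : p.2 with
        | none => rw [hp2] at h2; exact absurd h2 (by simp)
        | some f =>
          rw [hp2] at h2
          exact ⟨f, rfl, by simpa using h2⟩
      have hstep : pvPassStep (S, c) p = (S ++ [p.1], true) := by
        simp only [pvPassStep, hcond, if_true]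
        rw [PySem.Set.add_of_not_mem hnm]
      rw [hstep]
      have hgood' : ∀ a ∈ S ++ [p.1], pvALoop d (some a) (S ++ [p.1]).length = true := by
        intro a ha
        rcases List.mem_append.mp ha with h | h
        · exact pvALoop_mono d S.length _ _ (by simp) (hgood a h)
        · rw [List.mem_singleton] at h; subst h
          have hlen : (S ++ [p.1]).length = S.length + 1 := by simp
          rw [hlen]
          simp only [pvALoop]
          split_ifs with he
          · rfl
          · rw [hp, hp2]
            exact hgood f hfS
      have hsub' : S ++ [p.1] ⊆ d.keys := by
        intro a ha
        rcases List.mem_append.mp ha with h | h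
        · exact hsub h
        · rw [List.mem_singleton] at h; subst h
          exact (PySem.Dict.contains_iff_mem_keys _ _).mp
            (contains_of_getD_some d p.1 f (by rw [hp, hp2]))
      have hnod' : (S ++ [p.1]).Nodup :=
        List.Nodup.append hnod (List.nodup_singleton p.1)
          (by simp [List.disjoint_singleton, hnm])
      obtain ⟨g1, g2, g3, g4, g5, g6, g7⟩ := ih (S ++ [p.1]) true htail hgood' hsub' hnod'
      have hflag := g5 rfl
      refine ⟨g1, ?_, g3, g4, fun _ => hflag, fun h => by rw [h] at hflag; exact absurd hflag (by simp), fun _ _ => ?_⟩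
      · exact fun x hx => g2 (List.mem_append_left _ hx)
      · have hlen := List.Subperm.length_le (List.Nodup.subperm hnod' g2)
        simp only [List.length_append, List.length_singleton] at hlen
        omega
    · -- nothing happens on this item
      have hstep : pvPassStep (S, c) p = (S, c) := by
        rw [Bool.not_eq_true] at hcond
        simp only [pvPassStep, hcond, Bool.false_eq_true, if_false]
      rw [hstep]
      obtain ⟨g1, g2, g3, g4, g5, g6, g7⟩ := ih S c htail hgood hsub hnod
      refine ⟨g1, g2, g3, g4, g5, fun h => ?_, g7⟩
      obtain ⟨he, hrest⟩ := g6 h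
      refine ⟨he, fun q hq f hf hfS => ?_⟩
      rcases List.mem_cons.mp hq with rfl | hql
      · -- the head item: its condition was false, so p.1 ∈ S already
        rw [hf] at hcond
        simp only [Bool.and_eq_true, Bool.not_eq_true'] at hcond
        by_cases hmem : q.1 ∈ S
        · exact hmem
        · exfalso
          apply hcond
          constructor
          · simpa using hmem
          · simpa [PySem.Set.contains_iff] using hfS
      · exact hrest q hql f hf hfS

-- invariant of the whole relaxation: result is stable, closed, and sound for A
lemma pvFix_inv (d : PySem.Dict String (Option String)) (hnd : d.keys.Nodup) :
    ∀ (n : Nat) (S : PySem.Set String),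
      (∀ a ∈ S, pvALoop d (some a) S.length = true) → S ⊆ d.keys → S.Nodup →
      d.size < S.length + n →
      (∀ a ∈ pvFixLoop d S n, pvALoop d (some a) (pvFixLoop d S n).length = true) ∧
      S ⊆ pvFixLoop d S n ∧ pvFixLoop d S n ⊆ d.keys ∧ (pvFixLoop d S n).Nodup ∧
      (∀ a f, d.getD a none = some f → f ∈ pvFixLoop d S n → a ∈ pvFixLoop d S n) := by
  intro n
  induction n with
  | zero =>
    intro S _ hsub hnod hlt
    exact absurd (length_le_size d S hsub hnod) (by omega)
  | succ m ih =>
    intro S hgood hsub hnod hlt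
    have hitems : ∀ p ∈ d.items, d.getD p.1 none = p.2 := by
      intro p hp
      exact PySem.Dict.getD_of_mem_items d (k := p.1) (v := p.2) hp hnd none
    obtain ⟨g1, g2, g3, g4, g5, g6, g7⟩ := pvPass_fold_inv d d.items S false hitems hgood hsub hnod
    simp only [pvFixLoop]
    cases hc : (d.items.foldl pvPassStep (S, false)).2 with
    | false =>
      simp only [Bool.false_eq_true, if_false]
      obtain ⟨heq, hclosed⟩ := g6 hc
      rw [heq]
      refine ⟨hgood, fun _ h => h, hsub, hnod, fun a f hg hf => ?_⟩
      have hca : d.contains a = true := contains_of_getD_some d a f hg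
      have : (a, some f) ∈ d.items := by
        have := mem_items_getD d a hca
        rwa [hg] at this
      exact hclosed (a, some f) this f rfl hf
    | true =>
      simp only [if_true]
      have hlen := g7 rfl hc
      obtain ⟨k1, k2, k3, k4, k5⟩ := ih (d.items.foldl pvPassStep (S, false)).1 g1 g3 g4 (by omega)
      exact ⟨k1, fun x hx => k2 (g2 hx), k3, k4, k5⟩

-- the properties of the doomed set B computes
lemma pvDoomed_props (d : PySem.Dict String (Option String)) (hnd : d.keys.Nodup) :
    (∀ a ∈ pvDoomed d, pvALoop d (some a) (pvDoomed d).length = true) ∧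
    pvInit d ⊆ pvDoomed d ∧ pvDoomed d ⊆ d.keys ∧ (pvDoomed d).Nodup ∧
    (∀ a f, d.getD a none = some f → f ∈ pvDoomed d → a ∈ pvDoomed d) := by
  have hitems : ∀ p ∈ d.items, d.getD p.1 none = p.2 := by
    intro p hp
    exact PySem.Dict.getD_of_mem_items d (k := p.1) (v := p.2) hp hnd none
  obtain ⟨i1, i2, i3⟩ := pvInit_fold_inv d d.items PySem.Set.empty hitems (by simp [PySem.Set.empty]) (by simp [PySem.Set.empty]) (by simp [PySem.Set.empty])
  exact pvFix_inv d hnd (d.size + 1) (pvInit d) i1 i2 i3 (by omega)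

-- soundness: whenever A's walk detects extinction, the walked animal is doomed
lemma pvForward (d : PySem.Dict String (Option String)) (hnd : d.keys.Nodup) :
    ∀ (n : Nat) (a : String), pvALoop d (some a) n = true → a ∈ pvDoomed d := by
  intro n
  induction n with
  | zero => intro a h; exact absurd h (by simp [pvALoop])
  | succ m ih =>
    intro a h
    obtain ⟨_, hinit, _, _, hclosed⟩ := pvDoomed_props d hnd
    simp only [pvALoop] at h
    split_ifs at h with he
    · obtain ⟨f, hg, hf⟩ := pvExtImm_true_elim d a he
      apply hinit
      apply pvInit_fold_mem d d.items PySem.Set.empty a f _ hf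
      have := mem_items_getD d a (contains_of_getD_some d a f hg)
      rwa [hg] at this
    · cases hg : d.getD a none with
      | none => rw [hg, pvALoop_none] at h; exact absurd h (by simp)
      | some f =>
        rw [hg] at h
        exact hclosed a f hg (ih f h)

-- ===== VERDICT (by name: the statement is the Claim_ definition above) =====
theorem en_voie_disparition_spec : Claim_equal_en_voie_disparition := by
  intro eco animal _ hpre
  unfold Spec_en_voie_disparition en_voie_disparition en_voie_disparition_alt
  rcases hpre with rfl | hmem
  · rfl
  · set d := PySem.Dict.ofList eco with hd
    have hnd : d.keys.Nodup := PySem.Dict.nodup_keys_ofList eco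
    have hc : d.contains animal = true := by
      have hk : d.keys = PySem.Set.update (PySem.Dict.empty (κ := String) (ν := Option String)).keys (eco.map Prod.fst) := by
        show (eco.foldl (fun d p => d.insert p.1 p.2) PySem.Dict.empty).keys = _
        exact PySem.Dict.keys_foldl_insert_key eco Prod.fst (fun d p => p.2) _
      rw [PySem.Dict.contains_iff_mem_keys, hk, PySem.Set.mem_update]
      exact Or.inr hmem
    have hsz : 1 ≤ d.size := by
      have : animal ∈ d.keys := (PySem.Dict.contains_iff_mem_keys _ _).mp hc
      have h1 : 0 < d.keys.length := List.length_pos_of_mem this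
      have h2 : d.keys.length = d.size := by simp [PySem.Dict.keys, PySem.Dict.size]
      omega
    obtain ⟨m, hm⟩ : ∃ m, d.size = m + 1 := ⟨d.size - 1, by omega⟩
    have hne : ¬ (d.size = 0) := by omega
    simp only [hne, if_false]
    cases hg : d.getD animal none with
    | none =>
      rw [hm]
      simp only [pvALoop, pvExtImm_none d animal hg, Bool.false_eq_true, if_false, hg,
        pvALoop_none]
    | some f =>
      cases hf : d.contains f with
      | false =>
        rw [hm]
        simp only [pvALoop, pvExtImm_missing d animal f hg hf, if_true, hf, Bool.not_false]
      | true =>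
        simp only [hf, Bool.not_true, Bool.false_eq_true, if_false]
        rw [hm]
        simp only [pvALoop, pvExtImm_key d animal f hg hf, Bool.false_eq_true, if_false, hg]
        obtain ⟨hgood, _, hsubk, hnodR, hclosed⟩ := pvDoomed_props d hnd
        cases hA : pvALoop d (some f) m with
        | true =>
          have hfD : f ∈ pvDoomed d := pvForward d hnd m f hA
          simpa using hfD
        | false =>
          cases hcf : PySem.Set.contains (pvDoomed d) f with
          | false => rfl
          | true =>
            exfalso
            have hfD : f ∈ pvDoomed d := (PySem.Set.contains_iff _ _).mp hcf
            have haD : animal ∈ pvDoomed d := hclosed animal f hg hfD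
            have h1 : pvALoop d (some animal) (pvDoomed d).length = true := hgood animal haD
            have h2 : pvALoop d (some animal) d.size = true :=
              pvALoop_mono d _ _ _ (length_le_size d _ hsubk hnodR) h1
            rw [hm] at h2
            simp only [pvALoop, pvExtImm_key d animal f hg hf, Bool.false_eq_true, if_false,
              hg, hA] at h2
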